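-- pv_equiv track=rewrite | github.com/dkter/evolution_simulator | dna_parser.py | parse_dna
-- ===== SOURCE A (Python) =====
-- listOfCode={
--     'i': '\nif ',#
--     'l': '\nelif ',#
--     '&': ' and ',#
--     '|': ' or ',#
--     ':': ':',#
--     ';': '',#
--     'x': ' self.x ',#
--     'y': ' self.y ',#
--     'X': ' nearest.x ',#
--     'Y': ' nearest.y ',#
--     'p': ' distance(you, nearest) ',#
--     'f': ' nearest_food.x ',#
--     'F': ' nearest_food.y ',#
--     'P': ' distance(you, nearest_food) ',#
--     'z': ' self.signal ',#
--     'S': ' nearest.signal ',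
--     'c': ' self.creature_number ',#
--     'C': ' nearest.creature',#_number ',#
--     'A': ' nearest.attacking ',#
-- #   't': ' self.timer ',
--     'h': ' self.health ',#
--     'H': ' nearest.health ',#
--     'q': ' self.speed ',#
--     'Q': ' nearest.speed ',#
--     '+': '+',#
--     '-': '-',#
--     '*': '*',#
--     '/': '/',#
--     '%': '%',#
--     '=': '==',#
--     '!': '!=',#
--     '<': '<',#
--     ',': '<=',#
--     '>': '>',#
--     '.': '>=',#
--     'U': '\nself.votes["up"] += ',#
--     'L': '\nself.votes["left"] += ',#
--     'R': '\nself.votes["right"] += ',#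
--     'D': '\nself.votes["down"] += ',#
-- #   'T': '\nself.timer = ',
--     'b': '\nself.give_birth()',
--     'a': '\nself.attacking = True',#
--     's': '\nself.signal = '}#
--
-- def parse_dna(dna, creatures):
--     tempNumber = 0
--     char = dna[0]
--     code = ''
--     indentation = 0
--
--     while dna != '':
--         char = dna[0]
--         if char.isdigit():
--             while tempNumber < len(dna) and dna[tempNumber].isdigit():
--                 tempNumber += 1
--             code += str(int(dna[:tempNumber]))
--             dna = dna[tempNumber:]
--             tempNumber=0
--         else:
--             if char == ";":
--                 indentation -= 1
--             else:
--                 if listOfCode[char][0] == '\n':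
--                     if char == "l":
--                         indentation -= 1
--                     code += '\n' + ('    ' * indentation) + listOfCode[char][1:]
--                 else:
--                     code += ('    ' * indentation) + listOfCode[char]
--                 if char == ":":
--                     indentation += 1
--             dna = dna[1:]
--
--     # prettify code
--     # for i in code.split('\n'):
--     #     if '    ' in code.lstrip():
--     #         code = 2
--
--     return code
-- ===== SOURCE B (Python) =====
-- listOfCode={
--     'i': '\nif ', 'l': '\nelif ', '&': ' and ', '|': ' or ', ':': ':', ';': '',
--     'x': ' self.x ', 'y': ' self.y ', 'X': ' nearest.x ', 'Y': ' nearest.y ',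
--     'p': ' distance(you, nearest) ', 'f': ' nearest_food.x ', 'F': ' nearest_food.y ',
--     'P': ' distance(you, nearest_food) ', 'z': ' self.signal ', 'S': ' nearest.signal ',
--     'c': ' self.creature_number ', 'C': ' nearest.creature', 'A': ' nearest.attacking ',
--     'h': ' self.health ', 'H': ' nearest.health ', 'q': ' self.speed ', 'Q': ' nearest.speed ',
--     '+': '+', '-': '-', '*': '*', '/': '/', '%': '%', '=': '==', '!': '!=',
--     '<': '<', ',': '<=', '>': '>', '.': '>=',
--     'U': '\nself.votes["up"] += ', 'L': '\nself.votes["left"] += ',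
--     'R': '\nself.votes["right"] += ', 'D': '\nself.votes["down"] += ',
--     'b': '\nself.give_birth()', 'a': '\nself.attacking = True', 's': '\nself.signal = '}
--
-- def _tokenize(dna):
--     # maximal digit runs, or single symbols, by index (no re-slicing of dna)
--     tokens = []
--     i = 0
--     n = len(dna)
--     while i < n:
--         if dna[i].isdigit():
--             j = i
--             while j < n and dna[j].isdigit():
--                 j += 1
--             tokens.append(dna[i:j])
--             i = j
--         else:
--             tokens.append(dna[i])
--             i += 1
--     return tokens
--
-- def _next_indent(tok, ind):
--     # indentation in force AFTER the token
--     if tok == ';' or tok == 'l':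
--         return ind - 1
--     if tok == ':':
--         return ind + 1
--     return ind
--
-- def _render(tok, ind):
--     # the text a single token contributes, given the indentation before it
--     if tok == ';':
--         return ''
--     if tok[0].isdigit():
--         return str(int(tok))
--     snippet = listOfCode[tok]
--     if snippet[:1] == '\n':
--         return '\n' + '    ' * (ind - 1 if tok == 'l' else ind) + snippet[1:]
--     return '    ' * ind + snippet
--
-- def parse_dna(dna, creatures):
--     tokens = _tokenize(dna)
--     annotated = []
--     ind = 0
--     for tok in tokens:
--         annotated.append((tok, ind))
--         ind = _next_indent(tok, ind)
--     return ''.join(_render(tok, i) for tok, i in annotated)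
-- ===== Notes on version B (the rewrite author's own statement) =====
-- stated objective: faster
-- what changed: B replaces A's single loop that repeatedly re-slices the remaining string and grows one output string with three staged passes: an index-based tokenizer (digit runs / single symbols), an annotation pass pairing each token with the indentation in force before it (via a separate next-indent transition function), and an independent per-token render mapped over the annotated list and joined; B's Lean port also looks snippets up in the dict as an association structure rather than a 41-way branch.
import Mathlib
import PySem

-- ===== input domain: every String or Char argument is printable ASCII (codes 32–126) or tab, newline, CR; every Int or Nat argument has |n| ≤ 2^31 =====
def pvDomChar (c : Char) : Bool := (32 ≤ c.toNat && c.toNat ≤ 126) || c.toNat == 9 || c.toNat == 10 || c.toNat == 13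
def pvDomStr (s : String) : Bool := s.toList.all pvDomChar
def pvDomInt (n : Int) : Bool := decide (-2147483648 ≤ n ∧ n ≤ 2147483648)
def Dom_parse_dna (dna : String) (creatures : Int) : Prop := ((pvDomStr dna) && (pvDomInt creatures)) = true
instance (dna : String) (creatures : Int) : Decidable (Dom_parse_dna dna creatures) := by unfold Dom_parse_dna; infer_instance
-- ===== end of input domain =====

set_option maxRecDepth 8192


-- B splits the work into staged passes — tokenize once by index, annotate each token with
-- the indentation in force before it, render each annotated token independently and join —
-- instead of A's single loop that repeatedly re-slices the remaining string and grows one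
-- string; equivalence is proved on the inputs where A returns (return value only).

-- ===== PORT A =====

-- the module's listOfCode dict as A's loop consults it (none = KeyError)
def codeMap (c : Char) : Option (List Char) :=
  match c with
  | 'i' => some "\nif ".toList
  | 'l' => some "\nelif ".toList
  | '&' => some " and ".toList
  | '|' => some " or ".toList
  | ':' => some ":".toList
  | ';' => some "".toList
  | 'x' => some " self.x ".toList
  | 'y' => some " self.y ".toList
  | 'X' => some " nearest.x ".toList
  | 'Y' => some " nearest.y ".toList
  | 'p' => some " distance(you, nearest) ".toList
  | 'f' => some " nearest_food.x ".toList
  | 'F' => some " nearest_food.y ".toList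
  | 'P' => some " distance(you, nearest_food) ".toList
  | 'z' => some " self.signal ".toList
  | 'S' => some " nearest.signal ".toList
  | 'c' => some " self.creature_number ".toList
  | 'C' => some " nearest.creature".toList
  | 'A' => some " nearest.attacking ".toList
  | 'h' => some " self.health ".toList
  | 'H' => some " nearest.health ".toList
  | 'q' => some " self.speed ".toList
  | 'Q' => some " nearest.speed ".toList
  | '+' => some "+".toList
  | '-' => some "-".toList
  | '*' => some "*".toList
  | '/' => some "/".toList
  | '%' => some "%".toList
  | '=' => some "==".toList
  | '!' => some "!=".toList
  | '<' => some "<".toList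
  | ',' => some "<=".toList
  | '>' => some ">".toList
  | '.' => some ">=".toList
  | 'U' => some "\nself.votes[\"up\"] += ".toList
  | 'L' => some "\nself.votes[\"left\"] += ".toList
  | 'R' => some "\nself.votes[\"right\"] += ".toList
  | 'D' => some "\nself.votes[\"down\"] += ".toList
  | 'b' => some "\nself.give_birth()".toList
  | 'a' => some "\nself.attacking = True".toList
  | 's' => some "\nself.signal = ".toList
  | _ => none

-- str(int(<digit run>)): the run's numeric value, printed back (drops leading zeros)
def pvNatOf (l : List Char) : Nat := l.foldl (fun a c => 10 * a + (c.toNat - 48)) 0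
def pvDec (l : List Char) : List Char := (Nat.repr (pvNatOf l)).toList
-- '    ' * indentation  (negative repeat count gives '' in Python, as .toNat does)
def pvIndent (i : Int) : List Char := List.replicate (4 * i.toNat) ' '

-- A's while loop: char = dna[0]; digit branch collects the leading digit run and slices it
-- off; otherwise dict lookup with the indentation bookkeeping, then dna = dna[1:].
def loopA : List Char → Int → List Char
  | [], _ => []
  | c :: rest, ind =>
    if c.isDigit then
      -- inner while: tempNumber counts the leading digits; code += str(int(run))
      pvDec (c :: rest.takeWhile Char.isDigit) ++ loopA (rest.dropWhile Char.isDigit) ind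
    else if c = ';' then
      loopA rest (ind - 1)
    else
      match codeMap c with
      | some s =>
        -- listOfCode[char][0] == '\n' ; [1:] is .tail
        if s.head? = some '\n' then
          let ind' := if c = 'l' then ind - 1 else ind
          ('\n' :: (pvIndent ind' ++ s.tail)) ++ loopA rest (if c = ':' then ind' + 1 else ind')
        else
          (pvIndent ind ++ s) ++ loopA rest (if c = ':' then ind + 1 else ind)
      | none => []  -- KeyError: excluded by Pre_parse_dna
termination_by l => l.length
decreasing_by
  · simpa using Nat.lt_succ_of_le (List.length_dropWhile_le Char.isDigit rest)
  all_goals simp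

def parse_dna (dna : String) (creatures : Int) : String :=
  String.ofList (loopA dna.toList 0)

-- ===== PORT B =====

-- B looks the snippets up in the dict as an association structure
def codeDict : PySem.Dict Char String := PySem.Dict.ofList
  [('i', "\nif "), ('l', "\nelif "), ('&', " and "), ('|', " or "), (':', ":"), (';', ""),
   ('x', " self.x "), ('y', " self.y "), ('X', " nearest.x "), ('Y', " nearest.y "),
   ('p', " distance(you, nearest) "), ('f', " nearest_food.x "), ('F', " nearest_food.y "),
   ('P', " distance(you, nearest_food) "), ('z', " self.signal "), ('S', " nearest.signal "),
   ('c', " self.creature_number "), ('C', " nearest.creature"), ('A', " nearest.attacking "),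
   ('h', " self.health "), ('H', " nearest.health "), ('q', " self.speed "), ('Q', " nearest.speed "),
   ('+', "+"), ('-', "-"), ('*', "*"), ('/', "/"), ('%', "%"), ('=', "=="), ('!', "!="),
   ('<', "<"), (',', "<="), ('>', ">"), ('.', ">="),
   ('U', "\nself.votes[\"up\"] += "), ('L', "\nself.votes[\"left\"] += "),
   ('R', "\nself.votes[\"right\"] += "), ('D', "\nself.votes[\"down\"] += "),
   ('b', "\nself.give_birth()"), ('a', "\nself.attacking = True"), ('s', "\nself.signal = ")]

-- pass 1 (_tokenize): maximal digit runs and single symbols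
def tokensB : List Char → List (List Char)
  | [] => []
  | c :: rest =>
    if c.isDigit then
      (c :: rest.takeWhile Char.isDigit) :: tokensB (rest.dropWhile Char.isDigit)
    else
      [c] :: tokensB rest
termination_by l => l.length
decreasing_by
  · simpa using Nat.lt_succ_of_le (List.length_dropWhile_le Char.isDigit rest)
  all_goals simp

-- _next_indent: indentation in force AFTER a token
def nextIndB (tok : List Char) (ind : Int) : Int :=
  if tok = [';'] ∨ tok = ['l'] then ind - 1
  else if tok = [':'] then ind + 1
  else ind

-- _render: the text one token contributes, given the indentation before it
def renderB (tok : List Char) (ind : Int) : List Char :=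
  if tok = [';'] then []
  else if (tok.headD ' ').isDigit then
    (Nat.repr (tok.foldl (fun a c => 10 * a + (c.toNat - 48)) 0)).toList  -- str(int(tok))
  else
    match codeDict.get? (tok.headD ' ') with
    | some snippet =>
      if snippet.toList.head? = some '\n' then
        '\n' :: (List.replicate (4 * (if tok = ['l'] then ind - 1 else ind).toNat) ' ' ++ snippet.toList.tail)
      else List.replicate (4 * ind.toNat) ' ' ++ snippet.toList
    | none => []  -- KeyError: excluded by Pre_parse_dna

-- pass 2: pair every token with the indentation in force before it
def annotateB : List (List Char) → Int → List (List Char × Int)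
  | [], _ => []
  | tok :: ts, ind => (tok, ind) :: annotateB ts (nextIndB tok ind)

-- pass 3: render each annotated token independently; ''.join
def parse_dna_alt (dna : String) (creatures : Int) : String :=
  String.ofList (((annotateB (tokensB dna.toList) 0).map (fun p => renderB p.1 p.2)).flatten)

-- ===== PRECONDITION & SPEC =====

-- the characters listOfCode accepts
def pvKeys : List Char :=
  ['i', 'l', '&', '|', ':', ';', 'x', 'y', 'X', 'Y', 'p', 'f', 'F', 'P', 'z', 'S', 'c', 'C',
   'A', 'h', 'H', 'q', 'Q', '+', '-', '*', '/', '%', '=', '!', '<', ',', '>', '.', 'U', 'L',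
   'R', 'D', 'b', 'a', 's']

-- Pre_ excludes exactly the inputs where A raises: the empty string (IndexError on dna[0])
-- and strings containing a char that is neither a digit nor a listOfCode key (KeyError).
def Pre_parse_dna (dna : String) (creatures : Int) : Prop :=
  dna ≠ "" ∧ dna.toList.all (fun c => c.isDigit || pvKeys.contains c) = true
instance (dna : String) (creatures : Int) : Decidable (Pre_parse_dna dna creatures) := by
  unfold Pre_parse_dna; infer_instance

def pvWitness_parse_dna : String × Int := ("i1:U2;", 0)

def Spec_parse_dna (dna : String) (creatures : Int) (out : String) : Prop := out = parse_dna_alt dna creatures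
instance (dna : String) (creatures : Int) (out : String) : Decidable (Spec_parse_dna dna creatures out) := by unfold Spec_parse_dna; infer_instance

-- ===== CLAIM (what is proved, stated in full; the proofs are below) =====
def Claim_equal_parse_dna : Prop := ∀ (dna : String) (creatures : Int), Dom_parse_dna dna creatures → Pre_parse_dna dna creatures → Spec_parse_dna dna creatures (parse_dna dna creatures)

-- ===== LEMMAS AND PROOFS =====

-- B's dict lookup returns the same snippet (as a string) as A's on every key
lemma codeDict_get (c : Char) (h : c ∈ pvKeys) :
    (codeDict.get? c).map String.toList = codeMap c := by
  fin_cases h <;> decide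

lemma codeMap_isSome_of_mem (c : Char) (h : c ∈ pvKeys) : (codeMap c).isSome := by
  fin_cases h <;> decide

-- a digit-headed token is none of the three indentation-control tokens
lemma tok_digit_ne (c : Char) (cs : List Char) (h : c.isDigit = true) :
    c :: cs ≠ [';'] ∧ c :: cs ≠ ['l'] ∧ c :: cs ≠ [':'] := by
  refine ⟨?_, ?_, ?_⟩ <;>
    (intro h'; rw [List.cons_eq_cons] at h'; rw [h'.1] at h; exact absurd h (by decide))

lemma renderB_digit (c : Char) (cs : List Char) (ind : Int) (h : c.isDigit = true) :
    renderB (c :: cs) ind =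
      (Nat.repr ((c :: cs).foldl (fun a c => 10 * a + (c.toNat - 48)) 0)).toList := by
  simp [renderB, (tok_digit_ne c cs h).1, h]

lemma nextIndB_digit (c : Char) (cs : List Char) (ind : Int) (h : c.isDigit = true) :
    nextIndB (c :: cs) ind = ind := by
  obtain ⟨h1, h2, h3⟩ := tok_digit_ne c cs h
  simp [nextIndB, h1, h2, h3]

-- B renders the annotated token stream exactly as A's single loop does
lemma loopA_eq_render_annotate (l : List Char) (ind : Int)
    (hv : ∀ c ∈ l, c.isDigit = true ∨ c ∈ pvKeys) :
    loopA l ind = ((annotateB (tokensB l) ind).map (fun p => renderB p.1 p.2)).flatten := by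
  induction l using tokensB.induct generalizing ind with
  | case1 => simp [loopA, tokensB, annotateB]
  | case2 c rest hd ih =>
    have hv' : ∀ x ∈ rest.dropWhile Char.isDigit, x.isDigit = true ∨ x ∈ pvKeys :=
      fun x hx => hv x (List.mem_cons_of_mem _ ((rest.dropWhile_sublist Char.isDigit).mem hx))
    have IH := fun i => ih i hv'
    rw [loopA, tokensB]
    simp only [hd, if_true]
    rw [annotateB, List.map_cons, List.flatten_cons, renderB_digit _ _ _ hd,
      nextIndB_digit _ _ _ hd, IH]
    simp [pvDec, pvNatOf]
  | case3 c rest hd ih =>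
    have hv' : ∀ x ∈ rest, x.isDigit = true ∨ x ∈ pvKeys :=
      fun x hx => hv x (List.mem_cons_of_mem _ hx)
    have IH := fun i => ih i hv'
    have hc : c ∈ pvKeys := by
      rcases hv c (List.mem_cons_self) with h | h
      · exact absurd h (by simpa using hd)
      · exact h
    rw [loopA, tokensB]
    simp only [hd, Bool.false_eq_true, if_false]
    rw [annotateB, List.map_cons, List.flatten_cons]
    by_cases hs : c = ';'
    · subst hs
      have hr : renderB [';'] ind = [] := by simp [renderB]
      have hni : nextIndB [';'] ind = ind - 1 := by simp [nextIndB]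
      rw [if_pos rfl, hr, hni, IH]
      simp
    · rw [if_neg hs]
      have h1 : ([c] : List Char) ≠ [';'] := by simpa using hs
      cases hm : codeMap c with
      | none =>
        have := codeMap_isSome_of_mem c hc
        rw [hm] at this; simp at this
      | some s =>
        have hg := codeDict_get c hc
        rw [hm] at hg
        obtain ⟨snip, hsnip, hst⟩ := Option.map_eq_some_iff.mp hg
        simp only [hm]
        by_cases hn : s.head? = some '\n'
        · have hco : ¬ c = ':' := by
            intro h; subst h
            have hse : s = ":".toList :=
              (Option.some.inj (show some ":".toList = some s from hm)).symm
            rw [hse] at hn; exact absurd hn (by decide)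
          have hr : renderB [c] ind =
              '\n' :: (List.replicate (4 * (if c = 'l' then ind - 1 else ind).toNat) ' '
                ++ s.tail) := by
            by_cases hl : c = 'l'
            · subst hl
              have hse : s = "\nelif ".toList :=
                (Option.some.inj (show some "\nelif ".toList = some s from hm)).symm
              subst hse
              simp [renderB, hsnip, hst]
            · simp [renderB, h1, hd, hsnip, hst, hn, hl]
          have hni : nextIndB [c] ind = if c = 'l' then ind - 1 else ind := by
            by_cases hl : c = 'l'
            · subst hl; simp [nextIndB]
            · simp [nextIndB, hs, hl, hco]
          rw [if_pos hn, hr, hni]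
          simp only [if_neg hco]
          rw [IH]
          simp [pvIndent]
        · have hl : ¬ c = 'l' := by
            intro h; subst h
            have hse : s = "\nelif ".toList :=
              (Option.some.inj (show some "\nelif ".toList = some s from hm)).symm
            rw [hse] at hn; exact absurd hn (by decide)
          have hr : renderB [c] ind = List.replicate (4 * ind.toNat) ' ' ++ s := by
            simp [renderB, h1, hd, hsnip, hst, hn]
          have hni : nextIndB [c] ind = if c = ':' then ind + 1 else ind := by
            by_cases hco : c = ':'
            · subst hco; simp [nextIndB]
            · simp [nextIndB, hs, hl, hco]
          rw [if_neg hn, hr, hni, IH]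
          simp [pvIndent]

-- ===== VERDICT (by name: the statements are the Claim_ definitions above) =====
theorem parse_dna_spec : Claim_equal_parse_dna := by
  intro dna creatures _ hpre
  have hv : ∀ c ∈ dna.toList, c.isDigit = true ∨ c ∈ pvKeys := by
    intro c hc
    simpa using List.all_eq_true.mp hpre.2 c hc
  unfold Spec_parse_dna parse_dna parse_dna_alt
  rw [loopA_eq_render_annotate _ _ hv]
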